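-- pv_equiv track=rewrite | github.com/Kwakcena/codeplus-SW-competency | 재귀/암호-만들기/baekjoon_1759_test.py | check
-- ===== SOURCE A (Python) =====
-- def check(string):
--     ja, mo = 0, 0
--     for ch in list(string):
--         if ch == 'a' or ch == 'e' or ch == 'i' or ch == 'o' or ch == 'u':
--             mo += 1
--         else:
--             ja += 1
--     return ja >= 2 and mo >= 1
-- ===== SOURCE B (Python) =====
-- def check(string):
--     mo = 0
--     for v in 'aeiou':
--         mo += string.count(v)
--     return len(string) - mo >= 2 and mo >= 1
-- ===== Notes on version B (the rewrite author's own statement) =====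
-- stated objective: faster
-- what changed: B iterates over the vowel alphabet calling string.count(v) per vowel (five C-level library scans) instead of one Python-level character loop with two complementary if/else counters, and derives the consonant count as len(string) - mo.
import Mathlib
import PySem

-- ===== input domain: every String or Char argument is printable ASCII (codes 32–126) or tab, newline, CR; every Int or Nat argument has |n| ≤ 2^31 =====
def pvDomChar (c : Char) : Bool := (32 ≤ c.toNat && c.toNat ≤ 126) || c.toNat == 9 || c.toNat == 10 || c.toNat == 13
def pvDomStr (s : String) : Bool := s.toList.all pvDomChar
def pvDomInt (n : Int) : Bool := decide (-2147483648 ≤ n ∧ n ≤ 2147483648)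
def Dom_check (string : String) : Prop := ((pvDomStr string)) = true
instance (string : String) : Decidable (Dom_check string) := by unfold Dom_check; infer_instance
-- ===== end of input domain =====

-- B traverses the vowel alphabet with string.count per vowel (five library scans) and derives consonants as length - mo; alternative decomposition, same O(n) cost.


-- ===== PORT A =====
-- two counters ja (consonants) / mo (vowels) threaded through a fold over the characters, as in A's loop
def check (string : String) : Bool :=
  let p := string.toList.foldl (fun (acc : Int × Int) ch =>
    if ch = 'a' ∨ ch = 'e' ∨ ch = 'i' ∨ ch = 'o' ∨ ch = 'u' then (acc.1, acc.2 + 1)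
    else (acc.1 + 1, acc.2)) (0, 0)
  decide (p.1 ≥ 2) && decide (p.2 ≥ 1)

-- ===== PORT B =====
-- loop over the five vowels, adding string.count(v) each time (single-char substring count = char count, exact); consonants = length - mo
def check_alt (string : String) : Bool :=
  let mo : Int := ((['a','e','i','o','u'].foldl (fun acc v => acc + string.toList.count v) 0 : Nat) : Int)
  decide ((string.toList.length : Int) - mo ≥ 2) && decide (mo ≥ 1)

-- ===== PRECONDITION & SPEC =====
def Spec_check (string : String) (out : Bool) : Prop := out = check_alt string
instance (string : String) (out : Bool) : Decidable (Spec_check string out) := by unfold Spec_check; infer_instance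

-- ===== CLAIM (what is proved, stated in full; the proofs are below) =====
def Claim_equal_check : Prop := ∀ (string : String), Dom_check string → Spec_check string (check string)

-- ===== LEMMAS AND PROOFS =====
-- proof-only helper: A's branch condition as a Bool predicate
def vowelB (c : Char) : Bool := decide (c = 'a' ∨ c = 'e' ∨ c = 'i' ∨ c = 'o' ∨ c = 'u')

-- A's fold computes (length - #vowels, #vowels)
theorem check_foldl_eq (l : List Char) :
    l.foldl (fun (acc : Int × Int) ch =>
      if ch = 'a' ∨ ch = 'e' ∨ ch = 'i' ∨ ch = 'o' ∨ ch = 'u' then (acc.1, acc.2 + 1)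
      else (acc.1 + 1, acc.2)) (0, 0)
    = ((l.length : Int) - ((l.countP vowelB : Nat) : Int), ((l.countP vowelB : Nat) : Int)) := by
  suffices h : ∀ (ja mo : Int), l.foldl (fun (acc : Int × Int) ch =>
      if ch = 'a' ∨ ch = 'e' ∨ ch = 'i' ∨ ch = 'o' ∨ ch = 'u' then (acc.1, acc.2 + 1)
      else (acc.1 + 1, acc.2)) (ja, mo)
    = (ja + ((l.length : Int) - ((l.countP vowelB : Nat) : Int)),
       mo + ((l.countP vowelB : Nat) : Int)) by
    simpa using h 0 0
  induction l with
  | nil => simp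
  | cons c t ih =>
    intro ja mo
    by_cases hc : c = 'a' ∨ c = 'e' ∨ c = 'i' ∨ c = 'o' ∨ c = 'u'
    · have hm : vowelB c = true := decide_eq_true hc
      rw [List.foldl_cons, if_pos hc, ih]
      simp only [List.countP_cons, hm, List.length_cons, Prod.mk.injEq, if_true]
      push_cast
      omega
    · have hm : vowelB c = false := decide_eq_false hc
      rw [List.foldl_cons, if_neg hc, ih]
      simp only [List.countP_cons, hm, List.length_cons, Prod.mk.injEq, if_false, Bool.false_eq_true]
      push_cast
      omega

-- B's vowel-by-vowel sum of counts equals the one-pass vowel count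
theorem count_sum_eq_countP (l : List Char) :
    ['a','e','i','o','u'].foldl (fun acc v => acc + l.count v) 0 = l.countP vowelB := by
  simp only [List.foldl]
  induction l with
  | nil => simp
  | cons c t ih =>
    simp only [List.count_cons, List.countP_cons]
    by_cases h : c = 'a' ∨ c = 'e' ∨ c = 'i' ∨ c = 'o' ∨ c = 'u'
    · have hm : vowelB c = true := decide_eq_true h
      rcases h with h | h | h | h | h <;> subst h <;> simp [hm] <;> omega
    · have hm : vowelB c = false := decide_eq_false h
      push Not at h
      obtain ⟨h1, h2, h3, h4, h5⟩ := h
      simp [h1, h2, h3, h4, h5, hm]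
      omega

-- ===== VERDICT (by name: the statement is the Claim_ definition above) =====
theorem check_spec : Claim_equal_check := by
  intro s _
  unfold Spec_check check check_alt
  rw [check_foldl_eq s.toList, count_sum_eq_countP s.toList]
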